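-- pv_equiv track=rewrite | github.com/jayr-o1/resume-scorer | src/utils/visualizations.py | create_detailed_skills_breakdown
-- ===== SOURCE A (Python) =====
-- from typing import Dict, List, Tuple, Optional
--
-- def create_detailed_skills_breakdown(skill_details: List[Dict]) -> Dict:
--     """
--     Create a detailed breakdown of skills by category and proficiency
--
--     Parameters:
--     - skill_details: List of skill detail dictionaries
--
--     Returns:
--     - Chart data for visualizing skills by category and proficiency
--     """
--     if not skill_details:
--         return {"error": "No skill details available"}
--
--     # Group skills by category
--     categories = {}
--     for skill in skill_details:
--         category = skill.get("category", "other")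
--         if category not in categories:
--             categories[category] = []
--         categories[category].append(skill)
--
--     # Count skills by proficiency in each category
--     result = {}
--     for category, skills in categories.items():
--         proficiency_counts = {
--             "expert": 0,
--             "intermediate": 0,
--             "beginner": 0,
--             "unknown": 0
--         }
--
--         for skill in skills:
--             prof = skill.get("proficiency", "unknown")
--             proficiency_counts[prof] += 1
--
--         result[category] = proficiency_counts
--
--     return result
-- ===== SOURCE B (Python) =====
-- def create_detailed_skills_breakdown(skill_details):
--     """Counting reformulation: collect the distinct categories in first-occurrence order,
--     then compute each (category, proficiency) cell as a direct count over the input —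
--     no mutable counter dicts and no intermediate grouping."""
--     if not skill_details:
--         return {"error": "No skill details available"}
--     seen = []
--     for skill in skill_details:
--         c = skill.get("category", "other")
--         if c not in seen:
--             seen.append(c)
--     return {
--         c: {p: sum(1 for s in skill_details
--                    if s.get("category", "other") == c
--                    and s.get("proficiency", "unknown") == p)
--             for p in ("expert", "intermediate", "beginner", "unknown")}
--         for c in seen
--     }
-- ===== Notes on version B (the rewrite author's own statement) =====
-- stated objective: alternative
-- what changed: B never builds A's category->list grouping or mutable counter dicts: it collects the distinct categories in first-occurrence order, then fills each (category, proficiency) cell by a direct count over the input list.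
import Mathlib
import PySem

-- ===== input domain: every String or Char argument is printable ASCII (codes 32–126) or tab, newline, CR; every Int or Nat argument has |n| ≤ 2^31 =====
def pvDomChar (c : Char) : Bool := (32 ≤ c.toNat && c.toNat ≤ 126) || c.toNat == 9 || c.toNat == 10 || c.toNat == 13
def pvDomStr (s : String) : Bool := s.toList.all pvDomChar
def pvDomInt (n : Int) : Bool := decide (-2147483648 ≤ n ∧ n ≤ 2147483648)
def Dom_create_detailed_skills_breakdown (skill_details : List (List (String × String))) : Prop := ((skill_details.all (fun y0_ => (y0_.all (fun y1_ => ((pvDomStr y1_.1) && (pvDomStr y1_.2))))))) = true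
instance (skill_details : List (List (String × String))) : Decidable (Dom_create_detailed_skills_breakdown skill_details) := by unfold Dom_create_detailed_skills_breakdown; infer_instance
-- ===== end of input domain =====

-- B replaces A's grouping + mutable counter dicts by a counting reformulation: distinct
-- categories in first-occurrence order, each (category, proficiency) cell a direct count
-- over the input (objective: alternative).


-- ===== PORT A =====
-- skill.get(k, dflt): Python-dict lookup (a duplicate key in the assoc list overwrites, as dict() does)
def pvGet (skill : List (String × String)) (k dflt : String) : String :=
  (PySem.Dict.ofList skill).getD k dflt

-- the zero-initialised proficiency counter dict literal of A
def pvInit : PySem.Dict String Int :=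
  PySem.Dict.ofList [("expert", 0), ("intermediate", 0), ("beginner", 0), ("unknown", 0)]

-- Port of A. On [] Python returns {"error": "No skill details available"} — a str-valued dict outside
-- the return type — and on an unexpected proficiency value Python raises KeyError; both are excluded
-- by Pre_ (there `proficiency_counts[prof] += 1` is rendered as modify with default 0).
def create_detailed_skills_breakdown (skill_details : List (List (String × String))) : List (String × List (String × Int)) :=
  if skill_details = [] then []
  else
    let categories : PySem.Dict String (List (List (String × String))) :=
      skill_details.foldl (fun d skill =>
        let category := pvGet skill "category" "other"
        let d := if d.contains category then d else d.insert category []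
        d.modify category [] (fun l => l ++ [skill])) PySem.Dict.empty
    let result : PySem.Dict String (PySem.Dict String Int) :=
      categories.items.foldl (fun r p =>
        let counts := p.2.foldl (fun c skill => c.modify (pvGet skill "proficiency" "unknown") 0 (· + 1)) pvInit
        r.insert p.1 counts) PySem.Dict.empty
    result.items.map (fun q => (q.1, q.2.items))

-- ===== PORT B =====
-- the fixed proficiency tuple B iterates over
def pvProfs : List String := ["expert", "intermediate", "beginner", "unknown"]

def create_detailed_skills_breakdown_alt (skill_details : List (List (String × String))) : List (String × List (String × Int)) :=
  if skill_details = [] then []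
  else
    let seen : PySem.Set String :=
      skill_details.foldl (fun acc skill => PySem.Set.add acc (pvGet skill "category" "other")) PySem.Set.empty
    seen.map (fun c =>
      (c, pvProfs.map (fun p =>
        (p, ((skill_details.filter (fun s =>
              pvGet s "category" "other" == c && pvGet s "proficiency" "unknown" == p)).length : Int)))))

-- ===== PRECONDITION & SPEC =====
-- Pre_ excludes (i) the empty list, where A returns {"error": "No skill details available"} — a value
-- outside the declared return type — and (ii) skills whose proficiency (default "unknown") is not one
-- of the four counter keys, where A raises KeyError (B would return the counts with that skill uncounted).
def Pre_create_detailed_skills_breakdown (skill_details : List (List (String × String))) : Prop :=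
  skill_details ≠ [] ∧
  ∀ skill ∈ skill_details,
    ((PySem.Dict.ofList skill).getD "proficiency" "unknown") ∈
      (["expert", "intermediate", "beginner", "unknown"] : List String)
instance (skill_details : List (List (String × String))) : Decidable (Pre_create_detailed_skills_breakdown skill_details) := by unfold Pre_create_detailed_skills_breakdown; infer_instance

def pvWitness_create_detailed_skills_breakdown : (List (List (String × String))) :=
  [[("category", "technical"), ("proficiency", "expert")], [("name", "sql")]]

def Spec_create_detailed_skills_breakdown (skill_details : List (List (String × String))) (out : List (String × List (String × Int))) : Prop := out = create_detailed_skills_breakdown_alt skill_details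
instance (skill_details : List (List (String × String))) (out : List (String × List (String × Int))) : Decidable (Spec_create_detailed_skills_breakdown skill_details out) := by unfold Spec_create_detailed_skills_breakdown; infer_instance

-- ===== CLAIM (what is proved, stated in full; the proofs are below) =====
def Claim_equal_create_detailed_skills_breakdown : Prop := ∀ (skill_details : List (List (String × String))), Dom_create_detailed_skills_breakdown skill_details → Pre_create_detailed_skills_breakdown skill_details → Spec_create_detailed_skills_breakdown skill_details (create_detailed_skills_breakdown skill_details)

-- ===== LEMMAS AND PROOFS =====

-- insert-if-absent followed by modify is the same dict as a plain modify with the same default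
theorem pv_step_eq_modify {V : Type} (d : PySem.Dict String V) (k : String) (init : V) (g : V → V) :
    (if d.contains k then d else d.insert k init).modify k init g = d.modify k init g := by
  by_cases h : d.contains k
  · simp [h]
  · simp only [h, if_neg, Bool.false_eq_true, not_false_eq_true]
    show (d.insert k init).insert k (g ((d.insert k init).getD k init)) = d.insert k (g (d.getD k init))
    rw [PySem.Dict.getD_insert_self, PySem.Dict.insert_insert_self,
        PySem.Dict.getD_of_not_contains d init (by simpa using h)]

-- a modify-loop's value at key c is the fold of the update over the matching elements
theorem pv_getD_foldl_modify {V β : Type} (kf : β → String) (init : V) (g : β → V → V)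
    (l : List β) (d : PySem.Dict String V) (c : String) :
    (l.foldl (fun d a => d.modify (kf a) init (g a)) d).getD c init
      = (l.filter (fun a => kf a == c)).foldl (fun v a => g a v) (d.getD c init) := by
  induction l generalizing d with
  | nil => rfl
  | cons a t ih =>
      simp only [List.foldl_cons, List.filter_cons]
      rw [ih]
      by_cases h : kf a = c
      · simp [h]
      · simp [h, PySem.Dict.getD_modify, Ne.symm h]

-- foldl of successor counts the length
theorem pv_foldl_succ {β : Type} (l : List β) (n : Int) :
    l.foldl (fun v _ => v + 1) n = n + l.length := by
  induction l generalizing n with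
  | nil => simp
  | cons a t ih => simp [List.foldl_cons, ih]; ring

-- both ports produce the same value on every input of Pre_
theorem pv_ports_eq (sd : List (List (String × String)))
    (hpre : Pre_create_detailed_skills_breakdown sd) :
    create_detailed_skills_breakdown sd = create_detailed_skills_breakdown_alt sd := by
  obtain ⟨hsd, hprof⟩ := hpre
  simp only [create_detailed_skills_breakdown, create_detailed_skills_breakdown_alt,
    if_neg hsd, pv_step_eq_modify]
  set key : List (String × String) → String := fun skill => pvGet skill "category" "other" with hkey
  set prof : List (String × String) → String := fun skill => pvGet skill "proficiency" "unknown" with hprofdef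
  set gA : List (String × String) → List (List (String × String)) → List (List (String × String)) :=
    fun skill l => l ++ [skill] with hgA
  set M := sd.foldl (fun d skill => d.modify (key skill) [] (gA skill)) PySem.Dict.empty with hM
  have hMnd : M.keys.Nodup := by
    rw [hM]
    exact PySem.Dict.nodup_keys_foldl_modify_key sd key [] (fun _ s => gA s) _ (by simp)
  -- the second loop of A inserts the (distinct, fresh) category keys in order
  have hfresh : (M.items.foldl (fun r p =>
      r.insert p.1 (p.2.foldl (fun c skill => c.modify (prof skill) 0 (· + 1)) pvInit))
      (PySem.Dict.empty : PySem.Dict String (PySem.Dict String Int))).items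
      = M.items.map (fun p => (p.1,
          p.2.foldl (fun c skill => c.modify (prof skill) 0 (· + 1)) pvInit)) := by
    have := PySem.Dict.items_foldl_insert_fresh M.items Prod.fst
      (fun p => p.2.foldl (fun c skill => c.modify (prof skill) 0 (· + 1)) pvInit)
      (PySem.Dict.empty : PySem.Dict String (PySem.Dict String Int))
      (fun _ _ => PySem.Dict.contains_empty _) hMnd
    simpa using this
  rw [hfresh, PySem.Dict.items_eq_map_keys M hMnd []]
  -- B's `seen` set is exactly M's key list
  have hseen : sd.foldl (fun acc skill => PySem.Set.add acc (key skill)) PySem.Set.empty = M.keys := by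
    rw [hM, PySem.Dict.keys_foldl_modify_key sd key [] (fun _ s => gA s)]
    simp [PySem.Set.update, PySem.Set.empty, List.foldl_map, PySem.Dict.keys_empty]
  rw [hseen]
  simp only [List.map_map]
  refine List.map_congr_left (fun c _ => ?_)
  simp only [Function.comp]
  -- A's bucket for category c is the category-filtered input
  have hMget : M.getD c [] = sd.filter (fun s => key s == c) := by
    rw [hM, pv_getD_foldl_modify key [] gA sd PySem.Dict.empty c]
    simp only [hgA, PySem.Dict.getD_empty]
    simpa using PySem.List.foldl_append_singleton (sd.filter (fun s => key s == c)) []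
  rw [hMget]
  set fl := sd.filter (fun s => key s == c) with hfl
  set counts := fl.foldl (fun d skill => d.modify (prof skill) 0 (· + 1)) pvInit with hcounts
  -- under Pre_, every proficiency hit is one of the four keys, so the counter keeps exactly them
  have hflprof : ∀ s ∈ fl, prof s ∈ pvProfs := fun s hs =>
    hprof s (List.mem_of_mem_filter hs)
  have hkeysc : counts.keys = pvProfs := by
    rw [hcounts, PySem.Dict.keys_foldl_modify_key fl prof 0 (fun _ _ => (· + 1)),
      PySem.Set.update_eq_append_filter]
    have hinit : pvInit.keys = pvProfs := by decide
    rw [hinit]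
    have : (PySem.Set.ofList (fl.map prof)).filter
        (fun y => !(PySem.Set.contains pvProfs y)) = [] := by
      rw [List.filter_eq_nil_iff]
      intro y hy
      have : y ∈ fl.map prof := (PySem.Set.mem_ofList _ _).mp hy
      obtain ⟨s, hs, rfl⟩ := List.mem_map.mp this
      simpa using hflprof s hs
    rw [this, List.append_nil]
  have hndc : counts.keys.Nodup := by rw [hkeysc]; decide
  rw [PySem.Dict.items_eq_map_keys counts hndc 0, hkeysc]
  refine congrArg (Prod.mk c) (List.map_congr_left (fun p hp => ?_))
  refine congrArg (Prod.mk p) ?_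
  -- the count at p is the length of the doubly filtered list
  have hg0 : pvInit.getD p 0 = 0 := by
    fin_cases hp <;> decide
  rw [hcounts, pv_getD_foldl_modify prof 0 (fun _ => (· + 1)) fl pvInit p, hg0, pv_foldl_succ]
  rw [hfl, List.filter_filter]
  have hswap : List.filter (fun a => prof a == p && key a == c) sd
      = List.filter (fun s => pvGet s "category" "other" == c && pvGet s "proficiency" "unknown" == p) sd :=
    List.filter_congr fun a _ => by simp [hkey, hprofdef, Bool.and_comm]
  rw [hswap]
  omega

-- ===== VERDICT (by name: the statement is the Claim_ definition above) =====
theorem create_detailed_skills_breakdown_spec : Claim_equal_create_detailed_skills_breakdown := by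
  intro sd _ hpre
  unfold Spec_create_detailed_skills_breakdown
  exact pv_ports_eq sd hpre
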